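-- pv_equiv track=rewrite | github.com/kearseya/dysgu | dysgu/re_map.py | merge_align_regions
-- ===== SOURCE A (Python) =====
-- def merge_align_regions(locations):
--     # Merge any similar alignment regions found by edlib, used to get the bounds of the alignment region
--     if len(locations) <= 1:
--         return locations
--     merge_dist = 10
--     new_l = []
--     for s, e in locations:
--         if len(new_l) == 0:
--             new_l.append([s, e])
--         last = new_l[-1]
--
--         if abs(s - last[0]) < merge_dist and abs(e - last[1]) < merge_dist:
--             new_l[-1][1] = e
--         else:
--             return None
--     return new_l
-- ===== SOURCE B (Python) =====
-- def merge_align_regions(locations):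
--     # Aggregate formulation: reduce the chain to two maxima (start deviation from the
--     # first start, and consecutive end gap), compare each once, and emit the closed-form
--     # merged region [[first start, last end]].
--     if len(locations) <= 1:
--         return locations
--     starts = [s for s, _ in locations]
--     ends = [e for _, e in locations]
--     dev = max(abs(s - starts[0]) for s in starts)
--     gap = max(abs(b - a) for a, b in zip(ends, ends[1:]))
--     if dev < 10 and gap < 10:
--         return [[starts[0], ends[-1]]]
--     return None
-- ===== Notes on version B (the rewrite author's own statement) =====
-- stated objective: alternative
-- what changed: Replaces A's mutable-accumulator loop with early return by two staged aggregate passes (max start-deviation from the first start, max consecutive end gap), a single threshold comparison of those maxima, and a closed-form result [[first start, last end]].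
import Mathlib
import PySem

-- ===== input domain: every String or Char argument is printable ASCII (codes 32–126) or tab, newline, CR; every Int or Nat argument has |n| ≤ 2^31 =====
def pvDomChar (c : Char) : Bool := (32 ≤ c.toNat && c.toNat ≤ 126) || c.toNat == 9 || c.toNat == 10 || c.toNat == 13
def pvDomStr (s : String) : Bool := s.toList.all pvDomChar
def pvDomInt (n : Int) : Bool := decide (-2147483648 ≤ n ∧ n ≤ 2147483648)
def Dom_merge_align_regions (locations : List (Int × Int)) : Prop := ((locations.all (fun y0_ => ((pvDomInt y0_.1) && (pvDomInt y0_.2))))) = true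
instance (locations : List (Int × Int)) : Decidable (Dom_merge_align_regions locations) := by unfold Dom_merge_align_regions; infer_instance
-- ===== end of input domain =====

-- B replaces A's mutable accumulator with early bail by two staged aggregate passes
-- (max start deviation, max consecutive end gap) compared once, plus a closed-form result.


-- ===== PORT A =====
-- A's for-loop with mutable new_l and early `return None`
def mergeGoA : List (List Int) → List (Int × Int) → Option (List (List Int))
  | new_l, [] => some new_l
  | new_l, (s, e) :: rest =>
    let new_l := if new_l.length == 0 then new_l ++ [[s, e]] else new_l
    match new_l.getLast? with
    | none => none   -- unreachable: new_l is nonempty after the append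
    | some last =>
      if |s - last.getD 0 0| < 10 ∧ |e - last.getD 1 0| < 10 then
        mergeGoA (new_l.dropLast ++ [last.set 1 e]) rest   -- new_l[-1][1] = e
      else
        none

def merge_align_regions (locations : List (Int × Int)) : Option (List (List Int)) :=
  if locations.length ≤ 1 then some (locations.map fun p => [p.1, p.2])
  else mergeGoA [] locations

-- ===== PORT B =====
-- `max(...)` over the nonempty generators is ported as `foldl max 0`; exact here because
-- every generated value is an absolute value (≥ 0) and the generators are nonempty.
def merge_align_regions_alt (locations : List (Int × Int)) : Option (List (List Int)) :=
  if locations.length ≤ 1 then some (locations.map fun p => [p.1, p.2])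
  else
    let starts := locations.map Prod.fst
    let ends := locations.map Prod.snd
    let s0 := starts.headD 0
    let dev : Int := (starts.map (fun s => |s - s0|)).foldl max 0
    let gap : Int := ((ends.zip ends.tail).map (fun p => |p.2 - p.1|)).foldl max 0
    if dev < 10 ∧ gap < 10 then some [[s0, ends.getLastD 0]] else none

-- ===== PRECONDITION & SPEC =====
def Spec_merge_align_regions (locations : List (Int × Int)) (out : Option (List (List Int))) : Prop := out = merge_align_regions_alt locations
instance (locations : List (Int × Int)) (out : Option (List (List Int))) : Decidable (Spec_merge_align_regions locations out) := by unfold Spec_merge_align_regions; infer_instance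

-- ===== CLAIM (what is proved, stated in full; the proofs are below) =====
def Claim_equal_merge_align_regions : Prop := ∀ (locations : List (Int × Int)), Dom_merge_align_regions locations → Spec_merge_align_regions locations (merge_align_regions locations)

-- ===== LEMMAS AND PROOFS =====

-- Invariant step: once new_l = [[s0, pe]], A's loop checks the pair and updates the end.
theorem mergeGoA_step (s0 pe s e : Int) (rest : List (Int × Int)) :
    mergeGoA [[s0, pe]] ((s, e) :: rest) =
      if |s - s0| < 10 ∧ |e - pe| < 10 then mergeGoA [[s0, e]] rest else none := by
  rw [mergeGoA]; simp [List.set]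

-- A's loop over the tail validates the chain and keeps [[s0, last end]].
theorem mergeGoA_inv (rest : List (Int × Int)) (s0 pe : Int) :
    mergeGoA [[s0, pe]] rest =
      if (rest.zip (pe :: rest.dropLast.map Prod.snd)).all
           (fun x => decide (|x.1.1 - s0| < 10) && decide (|x.1.2 - x.2| < 10)) then
        some [[s0, (rest.map Prod.snd).getLastD pe]]
      else none := by
  induction rest generalizing pe with
  | nil => simp [mergeGoA]
  | cons hd tl ih =>
    obtain ⟨s, e⟩ := hd
    rw [mergeGoA_step]
    by_cases h : |s - s0| < 10 ∧ |e - pe| < 10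
    · obtain ⟨h1, h2⟩ := h
      rw [if_pos ⟨h1, h2⟩, ih]
      have hd1 : decide (|s - s0| < 10) = true := decide_eq_true h1
      have hd2 : decide (|e - pe| < 10) = true := decide_eq_true h2
      cases tl with
      | nil =>
        simp only [List.dropLast_singleton, List.map_nil, List.map_cons, List.zip_cons_cons,
          List.zip_nil_left, List.all_cons, List.all_nil, hd1, hd2, Bool.and_true,
          List.getLastD_cons, List.getLastD_nil]
      | cons a l =>
        simp only [List.dropLast_cons₂, List.map_cons, List.zip_cons_cons, List.all_cons,
          hd1, hd2, Bool.true_and, List.getLastD_cons]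
    · rw [if_neg h, if_neg]
      cases tl with
      | nil =>
        simp only [List.dropLast_singleton, List.map_nil, List.zip_cons_cons, List.zip_nil_left,
          List.all_cons, List.all_nil, Bool.and_eq_true, decide_eq_true_eq]
        tauto
      | cons a l =>
        simp only [List.dropLast_cons₂, List.map_cons, List.zip_cons_cons, List.all_cons,
          Bool.and_eq_true, decide_eq_true_eq]
        tauto

-- folded max is below a bound iff the seed and every element are.
theorem foldl_max_lt (L : List Int) (a c : Int) :
    L.foldl max a < c ↔ a < c ∧ ∀ x ∈ L, x < c := by
  induction L generalizing a with
  | nil => simp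
  | cons x tl ih =>
    simp only [List.foldl_cons, ih, max_lt_iff, List.mem_cons]
    constructor
    · rintro ⟨⟨ha, hx⟩, htl⟩; exact ⟨ha, fun y hy => by rcases hy with rfl | hy; exact hx; exact htl y hy⟩
    · rintro ⟨ha, h⟩; exact ⟨⟨ha, h x (Or.inl rfl)⟩, fun y hy => h y (Or.inr hy)⟩

-- A's per-element check splits into the start condition and the consecutive-end condition.
theorem cond_split (s0 : Int) (rest : List (Int × Int)) (pe : Int) :
    ((rest.zip (pe :: rest.dropLast.map Prod.snd)).all
       (fun x => decide (|x.1.1 - s0| < 10) && decide (|x.1.2 - x.2| < 10)) = true)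
    ↔ ((∀ p ∈ rest, |p.1 - s0| < 10) ∧
        ∀ q ∈ (pe :: rest.map Prod.snd).zip (rest.map Prod.snd), |q.2 - q.1| < 10) := by
  induction rest generalizing pe with
  | nil => simp
  | cons hd tl ih =>
    obtain ⟨s, e⟩ := hd
    have hL : (((s, e) :: tl).zip (pe :: ((s, e) :: tl).dropLast.map Prod.snd))
        = ((s, e), pe) :: tl.zip (e :: tl.dropLast.map Prod.snd) := by
      cases tl with
      | nil => simp
      | cons a l => simp [List.dropLast_cons₂]
    rw [hL]
    simp only [List.all_cons, Bool.and_eq_true, decide_eq_true_eq, ih e, List.map_cons,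
      List.zip_cons_cons, List.forall_mem_cons]
    tauto

-- ===== VERDICT (by name: the statement is the Claim_ definition above) =====
theorem merge_align_regions_spec : Claim_equal_merge_align_regions := by
  intro locations _
  unfold Spec_merge_align_regions
  match locations with
  | [] => rfl
  | [x] => rfl
  | (s0, e0) :: y :: ys =>
    have hlen : ¬((s0, e0) :: y :: ys).length ≤ 1 := by simp
    have step : mergeGoA [] ((s0, e0) :: y :: ys) = mergeGoA [[s0, e0]] (y :: ys) := by
      rw [mergeGoA]; simp [List.set]
    rw [merge_align_regions, if_neg hlen, step, mergeGoA_inv]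
    rw [merge_align_regions_alt, if_neg hlen]
    simp only [List.map_cons, List.headD_cons, List.tail_cons, List.getLastD_cons]
    by_cases hC : ((y :: ys).zip (e0 :: (y :: ys).dropLast.map Prod.snd)).all
        (fun x => decide (|x.1.1 - s0| < 10) && decide (|x.1.2 - x.2| < 10)) = true
    · rw [if_pos hC]
      obtain ⟨hs, hq⟩ := (cond_split s0 (y :: ys) e0).mp hC
      rw [if_pos]
      constructor
      · rw [foldl_max_lt]
        refine ⟨by norm_num, ?_⟩
        intro x hx
        simp only [List.mem_cons, List.mem_map] at hx
        rcases hx with rfl | rfl | ⟨a, ⟨p, hp, rfl⟩, rfl⟩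
        · norm_num
        · exact hs y (List.mem_cons_self)
        · exact hs p (List.mem_cons_of_mem _ hp)
      · rw [foldl_max_lt]
        refine ⟨by norm_num, ?_⟩
        intro x hx
        obtain ⟨q, hq', rfl⟩ := List.mem_map.mp hx
        apply hq
        simpa using hq'
    · rw [if_neg hC, if_neg]
      rintro ⟨hdev, hgap⟩
      apply hC
      rw [cond_split]
      rw [foldl_max_lt] at hdev hgap
      refine ⟨?_, ?_⟩
      · intro p hp
        rcases List.mem_cons.mp hp with rfl | hp'
        · exact hdev.2 _ (by simp)
        · exact hdev.2 _ (by simp only [List.mem_cons, List.mem_map]; exact Or.inr (Or.inr ⟨p.1, ⟨p, hp', rfl⟩, rfl⟩))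
      · intro q hq'
        simp only [List.map_cons] at hq'
        exact hgap.2 _ (List.mem_map.mpr ⟨q, hq', rfl⟩)
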